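-- pv_equiv track=rewrite | github.com/violetDelia/kernelcode_generate | kernel_gen/dsl/emit_mlir.py | _split_symbol_multiplication
-- ===== SOURCE A (Python) =====
-- def _split_symbol_multiplication(expr: str) -> list[str] | None:
--     """将符号乘法表达式拆分为多个 symbol 名称。
--
--     创建者: 小李飞刀
--     最后一次更改: 小李飞刀
--
--     功能说明:
--     - 仅支持以 `*` 连接的简单 symbol 乘法表达式。
--     - 包含其他运算符或空段时返回 None。
--
--     使用示例:
--     - _split_symbol_multiplication("M*N*K") -> ["M", "N", "K"]
--
--     关联文件:
--     - spec: [spec/dsl/emit_mlir.md](spec/dsl/emit_mlir.md)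
--     - test: [test/dsl/test_ast_visitor.py](test/dsl/test_ast_visitor.py)
--     - 功能实现: [kernel_gen/dsl/emit_mlir.py](kernel_gen/dsl/emit_mlir.py)
--     """
--     normalized = expr.strip()
--     if not normalized:
--         return None
--     for token in ("+", "-", "/", "//", "(", ")", " "):
--         if token in normalized:
--             return None
--     parts = normalized.split("*")
--     if any(not part for part in parts):
--         return None
--     return parts
-- ===== SOURCE B (Python) =====
-- def _split_symbol_multiplication(expr: str) -> list[str] | None:
--     """Single left-to-right scan: build the segments while validating each
--     character, instead of a forbidden-token pass plus split plus empty check."""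
--     parts = []
--     cur = []
--     for ch in expr.strip():
--         if ch in "+-/() ":
--             return None
--         if ch == "*":
--             if not cur:
--                 return None
--             parts.append("".join(cur))
--             cur = []
--         else:
--             cur.append(ch)
--     if not cur:
--         return None
--     parts.append("".join(cur))
--     return parts
-- ===== Notes on version B (the rewrite author's own statement) =====
-- stated objective: alternative
-- what changed: Replaces A's three passes (forbidden-substring scan per token, star-split, any-empty check) by one left-to-right character scan that validates each character and builds the segments incrementally.
import Mathlib
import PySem

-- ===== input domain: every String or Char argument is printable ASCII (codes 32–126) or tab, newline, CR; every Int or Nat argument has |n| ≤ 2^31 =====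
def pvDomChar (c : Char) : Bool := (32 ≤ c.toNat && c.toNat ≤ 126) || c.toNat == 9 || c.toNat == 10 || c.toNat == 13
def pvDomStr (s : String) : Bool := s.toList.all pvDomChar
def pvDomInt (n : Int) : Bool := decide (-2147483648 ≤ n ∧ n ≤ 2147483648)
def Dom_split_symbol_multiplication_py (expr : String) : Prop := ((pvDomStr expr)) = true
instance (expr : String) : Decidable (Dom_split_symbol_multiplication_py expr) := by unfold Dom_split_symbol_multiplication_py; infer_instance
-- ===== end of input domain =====

-- ===== PORT A =====
-- A: strip, return None on empty, on any forbidden token, or on an empty '*'-segment.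
def split_symbol_multiplication_py (expr : String) : Option (List String) :=
  let normalized := PySem.Str.strip expr
  if normalized = "" then none
  else if ["+", "-", "/", "//", "(", ")", " "].any (fun t => PySem.Str.isIn t normalized) then
    none
  else
    match PySem.Str.split? normalized "*" with
    | none => none
    | some parts => if parts.any (fun p => p == "") then none else some parts

-- ===== PORT B =====
-- B: one left-to-right scan of the stripped string, validating each character and
-- building the segments incrementally ('parts'/'cur' are Source B's accumulators).
def pvForbidden (c : Char) : Bool := "+-/() ".toList.contains c

def pvScan : List Char → List String → List Char → Option (List String)
  | [], parts, cur =>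
      if cur.isEmpty then none else some (parts ++ [String.ofList cur])
  | c :: rest, parts, cur =>
      if pvForbidden c then none
      else if c = '*' then
        if cur.isEmpty then none else pvScan rest (parts ++ [String.ofList cur]) []
      else pvScan rest parts (cur ++ [c])

def split_symbol_multiplication_py_alt (expr : String) : Option (List String) :=
  pvScan (PySem.Str.strip expr).toList [] []

-- ===== PRECONDITION & SPEC =====
def Spec_split_symbol_multiplication_py (expr : String) (out : Option (List String)) : Prop := out = split_symbol_multiplication_py_alt expr
instance (expr : String) (out : Option (List String)) : Decidable (Spec_split_symbol_multiplication_py expr out) := by unfold Spec_split_symbol_multiplication_py; infer_instance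

-- ===== CLAIM (what is proved, stated in full; the proofs are below) =====
def Claim_equal_split_symbol_multiplication_py : Prop := ∀ (expr : String), Dom_split_symbol_multiplication_py expr → Spec_split_symbol_multiplication_py expr (split_symbol_multiplication_py expr)

-- ===== LEMMAS AND PROOFS =====

-- Proof-only model: split a char list on '*', the current segment kept in natural order.
def splitStar : List Char → List Char → List (List Char)
  | [], cur => [cur]
  | c :: rest, cur =>
      if c = '*' then cur :: splitStar rest [] else splitStar rest (cur ++ [c])

theorem splitOn_go_star (fuel : Nat) :
    ∀ (l cur : List Char) (_ : l.length < fuel) (acc : List (List Char)),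
      PySem.Chars.splitOn.go ['*'] fuel l cur acc = acc.reverse ++ splitStar l cur.reverse := by
  induction fuel with
  | zero => intro l cur h; omega
  | succ f ih =>
    intro l cur h acc
    cases l with
    | nil => simp [PySem.Chars.splitOn.go, splitStar]
    | cons c rest =>
      rw [PySem.Chars.splitOn.go]
      by_cases hc : c = '*'
      · subst hc
        simp only [List.isPrefixOf, Bool.and_true, beq_self_eq_true, if_pos, List.length_singleton,
          List.drop_succ_cons, List.drop_zero]
        rw [ih rest [] (by simp at h ⊢; omega)]
        simp [splitStar]
      · have hp : ['*'].isPrefixOf (c :: rest) = false := by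
          simp [List.isPrefixOf]; exact fun h' => (hc h'.symm).elim
        rw [hp]
        simp only [Bool.false_eq_true, if_false]
        rw [ih rest (c :: cur) (by simp at h ⊢; omega)]
        simp [splitStar, hc]

theorem splitOn_star (l : List Char) :
    PySem.Chars.splitOn l ['*'] = splitStar l [] := by
  have := splitOn_go_star (l.length + 1) l [] (by omega) []
  simpa [PySem.Chars.splitOn] using this

-- B's scan, characterized: none iff a forbidden char occurs or some '*'-segment is empty.
theorem pvScan_eq (l : List Char) :
    ∀ (parts : List String) (cur : List Char),
      pvScan l parts cur =
        if l.any pvForbidden || (splitStar l cur).contains ([] : List Char) then none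
        else some (parts ++ (splitStar l cur).map String.ofList) := by
  induction l with
  | nil =>
    intro parts cur
    cases cur <;> simp [pvScan, splitStar]
  | cons c rest ih =>
    intro parts cur
    by_cases hf : pvForbidden c
    · simp [pvScan, hf, splitStar]
    · by_cases hc : c = '*'
      · subst hc
        cases cur with
        | nil => simp [pvScan, hf, splitStar]
        | cons x xs =>
          simp only [pvScan, hf, Bool.false_eq_true, if_false, List.isEmpty_cons, ih]
          simp [splitStar, hf]
      · simp only [pvScan, hf, Bool.false_eq_true, if_false, hc, ih]
        simp [splitStar, hc, hf]

theorem singleton_infix_iff_mem (a : Char) (l : List Char) : [a] <:+: l ↔ a ∈ l := by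
  constructor
  · intro h; exact h.sublist.subset (by simp)
  · intro h
    rcases List.append_of_mem h with ⟨s, t, rfl⟩
    exact ⟨s, t, by simp⟩

-- A's token loop hits iff some single forbidden character occurs ("//" is subsumed by "/").
theorem tokens_any (l : List Char) :
    (["+", "-", "/", "//", "(", ")", " "].any (fun t => PySem.Chars.isIn t.toList l))
      = l.any pvForbidden := by
  by_cases h : l.any pvForbidden = true
  · rw [h, List.any_eq_true]
    obtain ⟨c, hc, hf⟩ := List.any_eq_true.1 h
    have hmem : c = '+' ∨ c = '-' ∨ c = '/' ∨ c = '(' ∨ c = ')' ∨ c = ' ' := by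
      have e : ("+-/() " : String).toList = ['+', '-', '/', '(', ')', ' '] := rfl
      simp only [pvForbidden, e, List.contains_eq_mem, decide_eq_true_eq, List.mem_cons,
        List.not_mem_nil, or_false] at hf
      exact hf
    have key : ∀ t : String, t ∈ ["+", "-", "/", "//", "(", ")", " "] → t.toList = [c] →
        ∃ x ∈ ["+", "-", "/", "//", "(", ")", " "],
          (fun t => PySem.Chars.isIn t.toList l) x = true := by
      intro t hmem ht
      refine ⟨t, hmem, ?_⟩
      show PySem.Chars.isIn t.toList l = true
      rw [PySem.Chars.isIn_iff_infix, ht]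
      exact (singleton_infix_iff_mem _ _).2 hc
    rcases hmem with rfl | rfl | rfl | rfl | rfl | rfl
    · exact key "+" (by simp) rfl
    · exact key "-" (by simp) rfl
    · exact key "/" (by simp) rfl
    · exact key "(" (by simp) rfl
    · exact key ")" (by simp) rfl
    · exact key " " (by simp) rfl
  · rw [Bool.not_eq_true] at h
    rw [h, List.any_eq_false]
    have hn := List.any_eq_false.1 h
    intro t ht
    simp only [Bool.not_eq_true]
    rw [PySem.Chars.isIn_eq_false_iff]
    intro hinf
    have hmem : t = "+" ∨ t = "-" ∨ t = "/" ∨ t = "//" ∨ t = "(" ∨ t = ")" ∨ t = " " := by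
      simpa using ht
    rcases hmem with rfl | rfl | rfl | rfl | rfl | rfl | rfl
    · exact hn _ (hinf.sublist.subset (by decide : '+' ∈ ("+" : String).toList)) (by decide)
    · exact hn _ (hinf.sublist.subset (by decide : '-' ∈ ("-" : String).toList)) (by decide)
    · exact hn _ (hinf.sublist.subset (by decide : '/' ∈ ("/" : String).toList)) (by decide)
    · exact hn _ (hinf.sublist.subset (by decide : '/' ∈ ("//" : String).toList)) (by decide)
    · exact hn _ (hinf.sublist.subset (by decide : '(' ∈ ("(" : String).toList)) (by decide)
    · exact hn _ (hinf.sublist.subset (by decide : ')' ∈ (")" : String).toList)) (by decide)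
    · exact hn _ (hinf.sublist.subset (by decide : ' ' ∈ (" " : String).toList)) (by decide)

theorem ofList_eq_empty_iff (cs : List Char) : String.ofList cs = "" ↔ cs = [] := by
  constructor
  · intro h; have := congrArg String.toList h; simpa using this
  · intro h; subst h; rfl

theorem any_map_empty (ps : List (List Char)) :
    (ps.map String.ofList).any (fun p => p == "") = ps.contains ([] : List Char) := by
  induction ps with
  | nil => rfl
  | cons x xs ih =>
    simp only [List.map_cons, List.any_cons, ih, List.contains_cons]
    congr 1
    rw [Bool.eq_iff_iff, beq_iff_eq, beq_iff_eq, ofList_eq_empty_iff]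
    exact ⟨fun h => h.symm, fun h => h.symm⟩

theorem main_eq (ns : String) :
    (if ns = "" then none
     else if ["+", "-", "/", "//", "(", ")", " "].any (fun t => PySem.Str.isIn t ns) then
       (none : Option (List String))
     else
       match PySem.Str.split? ns "*" with
       | none => none
       | some parts => if parts.any (fun p => p == "") then none else some parts)
      = pvScan ns.toList [] [] := by
  rw [pvScan_eq]
  by_cases hempty : ns = ""
  · subst hempty; simp [splitStar]
  · rw [if_neg hempty]
    simp only [PySem.Str.isIn, tokens_any ns.toList]
    by_cases hf : ns.toList.any pvForbidden = true
    · simp [hf]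
    · rw [Bool.not_eq_true] at hf
      rw [hf]
      simp only [PySem.Str.split?, PySem.Chars.split?]
      have hsep : ("*" : String).toList = ['*'] := rfl
      rw [hsep]
      simp only [List.isEmpty_cons, Bool.false_eq_true, if_false, Option.map_some, splitOn_star]
      simp only [Bool.false_or]
      rw [any_map_empty]
      simp

-- ===== VERDICT (by name: the statement is the Claim_ definition above) =====
theorem split_symbol_multiplication_py_spec : Claim_equal_split_symbol_multiplication_py := by
  intro expr _
  show split_symbol_multiplication_py expr = split_symbol_multiplication_py_alt expr
  unfold split_symbol_multiplication_py split_symbol_multiplication_py_alt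
  exact main_eq (PySem.Str.strip expr)
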